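-- pv_equiv track=rewrite | github.com/PaulDVS/C343PaulVSClassWork | Python classes/zybooks/27.54.py | guitarTabs
-- ===== SOURCE A (Python) =====
-- def guitarTabs(chordList):
--     tabList = []
--     tabList.append("e|-")
--     tabList.append("B|-")
--     tabList.append("G|-")
--     tabList.append("D|-")
--     tabList.append("A|-")
--     tabList.append("E|-")
--
--     for x in chordList:
--         if (x == "G"):
--             tabList[0] = tabList[0] + "3-"
--             tabList[1] = tabList[1] + "0-"
--             tabList[2] = tabList[2] + "0-"
--             tabList[3] = tabList[3] + "0-"
--             tabList[4] = tabList[4] + "2-"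
--             tabList[5] = tabList[5] + "3-"
--         elif (x == "C"):
--             tabList[0] = tabList[0] + "0-"
--             tabList[1] = tabList[1] + "1-"
--             tabList[2] = tabList[2] + "0-"
--             tabList[3] = tabList[3] + "2-"
--             tabList[4] = tabList[4] + "3-"
--             tabList[5] = tabList[5] + "--"
--         elif (x == "D"):
--             tabList[0] = tabList[0] + "2-"
--             tabList[1] = tabList[1] + "3-"
--             tabList[2] = tabList[2] + "2-"
--             tabList[3] = tabList[3] + "0-"
--             tabList[4] = tabList[4] + "--"
--             tabList[5] = tabList[5] + "--"
--
--     return tabList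
-- ===== SOURCE B (Python) =====
-- def guitarTabs(chordList):
--     table = {
--         "G": ("3-", "0-", "0-", "0-", "2-", "3-"),
--         "C": ("0-", "1-", "0-", "2-", "3-", "--"),
--         "D": ("2-", "3-", "2-", "0-", "--", "--"),
--     }
--     prefixes = ["e|-", "B|-", "G|-", "D|-", "A|-", "E|-"]
--     return [p + "".join(table[x][i] for x in chordList if x in table)
--             for i, p in enumerate(prefixes)]
-- ===== Notes on version B (the rewrite author's own statement) =====
-- stated objective: idiomatic
-- what changed: Transposed the nesting: instead of folding over chords while mutating six tab strings through an if/elif ladder, B keeps a chord->fragments table and builds each of the six lines independently (strings outer, chords inner) as prefix + joined fragments of the known chords.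
import Mathlib
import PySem

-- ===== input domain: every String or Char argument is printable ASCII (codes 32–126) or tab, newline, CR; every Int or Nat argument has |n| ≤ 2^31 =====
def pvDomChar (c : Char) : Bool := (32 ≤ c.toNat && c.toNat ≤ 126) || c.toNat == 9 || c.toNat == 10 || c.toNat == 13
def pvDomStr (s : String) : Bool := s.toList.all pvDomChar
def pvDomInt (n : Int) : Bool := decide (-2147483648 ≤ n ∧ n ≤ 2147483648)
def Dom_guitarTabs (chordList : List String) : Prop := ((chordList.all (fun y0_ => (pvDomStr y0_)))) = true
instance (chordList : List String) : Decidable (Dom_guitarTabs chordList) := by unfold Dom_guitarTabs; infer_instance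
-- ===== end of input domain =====

-- B rebuilds the same tabs per string line from a chord→fragments table (idiomatic transposition of A's loop); equivalence proved on all inputs.

-- ===== PORT A =====
-- A's mutable 6-element tabList is the 6-tuple state of a fold over chordList,
-- with the same if/elif ladder appending the same fragments in the same order.
def guitarTabsStep (t : String × String × String × String × String × String) (x : String) :
    String × String × String × String × String × String :=
  let (t0, t1, t2, t3, t4, t5) := t
  if x == "G" then (t0 ++ "3-", t1 ++ "0-", t2 ++ "0-", t3 ++ "0-", t4 ++ "2-", t5 ++ "3-")
  else if x == "C" then (t0 ++ "0-", t1 ++ "1-", t2 ++ "0-", t3 ++ "2-", t4 ++ "3-", t5 ++ "--")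
  else if x == "D" then (t0 ++ "2-", t1 ++ "3-", t2 ++ "2-", t3 ++ "0-", t4 ++ "--", t5 ++ "--")
  else t

def guitarTabs (chordList : List String) : List String :=
  let t := chordList.foldl guitarTabsStep ("e|-", "B|-", "G|-", "D|-", "A|-", "E|-")
  [t.1, t.2.1, t.2.2.1, t.2.2.2.1, t.2.2.2.2.1, t.2.2.2.2.2]

-- ===== PORT B =====
-- table[x] : the 6 fragments for a known chord, none for an unknown one.
def tabFrag? (x : String) : Option (String × String × String × String × String × String) :=
  if x == "G" then some ("3-", "0-", "0-", "0-", "2-", "3-")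
  else if x == "C" then some ("0-", "1-", "0-", "2-", "3-", "--")
  else if x == "D" then some ("2-", "3-", "2-", "0-", "--", "--")
  else none

def tabPick (t : String × String × String × String × String × String) (i : Nat) : String :=
  match i with
  | 0 => t.1
  | 1 => t.2.1
  | 2 => t.2.2.1
  | 3 => t.2.2.2.1
  | 4 => t.2.2.2.2.1
  | _ => t.2.2.2.2.2

-- "".join(table[x][i] for x in chordList if x in table)
def tabLine (chordList : List String) (i : Nat) : String :=
  chordList.foldl (fun acc x => match tabFrag? x with
    | some t => acc ++ tabPick t i
    | none => acc) ""

def guitarTabs_alt (chordList : List String) : List String :=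
  (["e|-", "B|-", "G|-", "D|-", "A|-", "E|-"].zipIdx).map
    (fun pi => pi.1 ++ tabLine chordList pi.2)

-- ===== PRECONDITION & SPEC =====
def Spec_guitarTabs (chordList : List String) (out : List String) : Prop := out = guitarTabs_alt chordList
instance (chordList : List String) (out : List String) : Decidable (Spec_guitarTabs chordList out) := by unfold Spec_guitarTabs; infer_instance

-- ===== CLAIM (what is proved, stated in full; the proofs are below) =====
def Claim_equal_guitarTabs : Prop := ∀ (chordList : List String), Dom_guitarTabs chordList → Spec_guitarTabs chordList (guitarTabs chordList)

-- ===== LEMMAS AND PROOFS =====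

-- pulling the seed of B's per-line fold out front
theorem tabLineFold_shift (chordList : List String) (i : Nat) (s : String) :
    chordList.foldl (fun acc x => match tabFrag? x with
      | some t => acc ++ tabPick t i
      | none => acc) s = s ++ tabLine chordList i := by
  induction chordList generalizing s with
  | nil => simp [tabLine]
  | cons x xs ih =>
    simp only [tabLine, List.foldl]
    cases h : tabFrag? x with
    | none => simpa [h, tabLine] using ih s
    | some t =>
      rw [ih (s ++ tabPick t i), ih ("" ++ tabPick t i)]
      simp [String.append_assoc]

-- A's fold, started from any 6-tuple, appends exactly B's six lines componentwise
theorem guitarTabs_loop (chordList : List String)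
    (s0 s1 s2 s3 s4 s5 : String) :
    chordList.foldl guitarTabsStep (s0, s1, s2, s3, s4, s5) =
      (s0 ++ tabLine chordList 0, s1 ++ tabLine chordList 1, s2 ++ tabLine chordList 2,
       s3 ++ tabLine chordList 3, s4 ++ tabLine chordList 4, s5 ++ tabLine chordList 5) := by
  induction chordList generalizing s0 s1 s2 s3 s4 s5 with
  | nil => simp [tabLine]
  | cons x xs ih =>
    simp only [List.foldl, guitarTabsStep]
    have hline : ∀ i : Nat, tabLine (x :: xs) i =
        (match tabFrag? x with
          | some t => "" ++ tabPick t i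
          | none => "") ++ tabLine xs i := by
      intro i
      simp only [tabLine, List.foldl]
      cases h : tabFrag? x with
      | none => simp
      | some t => simpa [h] using tabLineFold_shift xs i ("" ++ tabPick t i)
    by_cases hG : x == "G"
    · simp [hG, ih, hline, tabFrag?, tabPick, String.append_assoc]
    · by_cases hC : x == "C"
      · simp [hG, hC, ih, hline, tabFrag?, tabPick, String.append_assoc]
      · by_cases hD : x == "D"
        · simp [hG, hC, hD, ih, hline, tabFrag?, tabPick, String.append_assoc]
        · simp [hG, hC, hD, ih, hline, tabFrag?]

-- ===== VERDICT (by name: the statement is the Claim_ definition above) =====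
theorem guitarTabs_spec : Claim_equal_guitarTabs := by
  intro chordList _
  unfold Spec_guitarTabs guitarTabs guitarTabs_alt
  rw [guitarTabs_loop]
  simp [List.zipIdx]
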